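-- pv_equiv track=rewrite | github.com/efrenaguilar95/Yelp_Analyzer | Yelp Dataset/yelp_review.py | split_by_rating
-- ===== SOURCE A (Python) =====
-- def split_by_rating(data, cap):
--     """
--     Splits json data based on if a review is positive or negative with a max
--     number of positive and negative reviews
--
--     Parameters
--     ---------
--     data : list of dicts
--         The yelp data to be split
--     cap : int
--         The max amount of positive or negative reviews to be in a list
--
--     Returns
--     -------
--     two lists of json dicts
--         Returns two lists of json data. One for positive data, one for negative
--         data
--     """
--     positive = []
--     negative = []
--     for review in data:
--         if review['stars'] >= 4 and len(positive) != cap: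
--             positive.append(review)
--         elif review['stars'] <= 2 and len(negative) != cap:
--             negative.append(review)
--     return positive, negative
-- ===== SOURCE B (Python) =====
-- def split_by_rating(data, cap):
--     """Split reviews into positive (stars>=4) and negative (stars<=2) lists,
--     each capped at `cap` elements (a cap the length never hits, e.g. negative,
--     means unlimited). Two independent filtering passes instead of one
--     interleaved loop."""
--     def take(pred):
--         out = []
--         for review in data:
--             if len(out) == cap:
--                 break
--             if pred(review['stars']):
--                 out.append(review)
--         return out
--     return take(lambda s: s >= 4), take(lambda s: s <= 2)
-- ===== Notes on version B (the rewrite author's own statement) =====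
-- stated objective: simpler
-- what changed: One interleaved accumulate loop with an if/elif over two lists is replaced by a single reusable capped-filter helper run in two independent passes (positives and negatives never overlap, and a full list stays full, so the passes decompose); the helper stops early once the cap is reached.
import Mathlib
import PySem

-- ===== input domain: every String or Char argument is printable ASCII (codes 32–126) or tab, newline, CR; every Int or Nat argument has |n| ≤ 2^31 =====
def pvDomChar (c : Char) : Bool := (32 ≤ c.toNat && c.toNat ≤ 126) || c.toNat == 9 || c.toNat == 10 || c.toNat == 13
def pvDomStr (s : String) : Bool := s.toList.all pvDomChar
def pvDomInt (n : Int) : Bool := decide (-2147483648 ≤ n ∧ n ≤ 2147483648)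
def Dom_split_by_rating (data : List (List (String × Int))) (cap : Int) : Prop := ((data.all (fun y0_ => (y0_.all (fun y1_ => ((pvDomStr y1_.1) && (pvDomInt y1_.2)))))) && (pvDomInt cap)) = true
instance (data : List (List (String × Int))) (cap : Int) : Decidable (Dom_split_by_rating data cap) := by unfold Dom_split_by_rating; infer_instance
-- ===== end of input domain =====

-- Header: B replaces A's single interleaved if/elif loop over two accumulators by one
-- reusable capped-filter helper run in two independent passes (the two rating classes
-- are disjoint, so the passes decompose); same O(n) cost, simpler decomposition.

-- ===== PORT A =====
-- review['stars']: first-match lookup in the association list; a missing key is a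
-- KeyError in Python, excluded by Pre_ below (the default 3 is never used inside Pre_).
def pvStars (review : List (String × Int)) : Int :=
  match review.find? (fun kv => kv.1 == "stars") with
  | some kv => kv.2
  | none => 3

def split_by_rating (data : List (List (String × Int))) (cap : Int) : (List (List (String × Int))) × (List (List (String × Int))) :=
  data.foldl (fun acc review =>
    if pvStars review ≥ 4 ∧ (acc.1.length : Int) ≠ cap then (acc.1 ++ [review], acc.2)
    else if pvStars review ≤ 2 ∧ (acc.2.length : Int) ≠ cap then (acc.1, acc.2 ++ [review])
    else acc) ([], [])

-- ===== PORT B =====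
-- Source B's `take`: one capped filtering pass, stopping early once the cap is reached.
def pvTake (pred : Int → Prop) [DecidablePred pred] (cap : Int) (data : List (List (String × Int))) (out : List (List (String × Int))) : List (List (String × Int)) :=
  match data with
  | [] => out
  | r :: rest =>
    if (out.length : Int) = cap then out
    else if pred (pvStars r) then pvTake pred cap rest (out ++ [r])
    else pvTake pred cap rest out

def split_by_rating_alt (data : List (List (String × Int))) (cap : Int) : (List (List (String × Int))) × (List (List (String × Int))) :=
  (pvTake (fun s => s ≥ 4) cap data [], pvTake (fun s => s ≤ 2) cap data [])

-- ===== PRECONDITION & SPEC =====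
-- Pre_ excludes exactly the inputs where Python A raises KeyError: a review without a 'stars' key.
def Pre_split_by_rating (data : List (List (String × Int))) (cap : Int) : Prop :=
  (data.all (fun r => (r.find? (fun kv => kv.1 == "stars")).isSome)) = true
instance (data : List (List (String × Int))) (cap : Int) : Decidable (Pre_split_by_rating data cap) := by unfold Pre_split_by_rating; infer_instance

def pvWitness_split_by_rating : (List (List (String × Int))) × Int := ([[("stars", 5)], [("stars", 1)]], 1)

def Spec_split_by_rating (data : List (List (String × Int))) (cap : Int) (out : (List (List (String × Int))) × (List (List (String × Int)))) : Prop := out = split_by_rating_alt data cap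
instance (data : List (List (String × Int))) (cap : Int) (out : (List (List (String × Int))) × (List (List (String × Int)))) : Decidable (Spec_split_by_rating data cap out) := by unfold Spec_split_by_rating; infer_instance

-- ===== CLAIM (what is proved, stated in full; the proofs are below) =====
def Claim_equal_split_by_rating : Prop := ∀ (data : List (List (String × Int))) (cap : Int), Dom_split_by_rating data cap → Pre_split_by_rating data cap → Spec_split_by_rating data cap (split_by_rating data cap)

-- ===== LEMMAS AND PROOFS =====

-- A full output list never changes again.
theorem pvTake_full (pred : Int → Prop) [DecidablePred pred] (cap : Int) (data : List (List (String × Int))) (out : List (List (String × Int))) (h : (out.length : Int) = cap) : pvTake pred cap data out = out := by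
  cases data <;> simp [pvTake, h]

theorem pv_loop_eq (cap : Int) (data : List (List (String × Int))) : ∀ (p n : List (List (String × Int))),
    data.foldl (fun acc review =>
      if pvStars review ≥ 4 ∧ (acc.1.length : Int) ≠ cap then (acc.1 ++ [review], acc.2)
      else if pvStars review ≤ 2 ∧ (acc.2.length : Int) ≠ cap then (acc.1, acc.2 ++ [review])
      else acc) (p, n)
    = (pvTake (fun s => s ≥ 4) cap data p, pvTake (fun s => s ≤ 2) cap data n) := by
  induction data with
  | nil => intro p n; simp [pvTake]
  | cons r rest ih =>
    intro p n
    by_cases h1 : pvStars r ≥ 4 ∧ (p.length : Int) ≠ cap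
    · rw [List.foldl_cons]; simp only [if_pos h1]
      rw [ih]
      have hneg : ¬ pvStars r ≤ 2 := by omega
      by_cases hn : (n.length : Int) = cap
      · simp [pvTake, h1.1, h1.2, hn, pvTake_full]
      · simp [pvTake, h1.1, h1.2, hn, hneg]
    · by_cases h2 : pvStars r ≤ 2 ∧ (n.length : Int) ≠ cap
      · rw [List.foldl_cons]; simp only [if_neg h1, if_pos h2]
        rw [ih]
        have hpos : ¬ pvStars r ≥ 4 := by omega
        by_cases hp : (p.length : Int) = cap
        · simp [pvTake, h2.1, h2.2, hp, pvTake_full]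
        · simp [pvTake, h2.1, h2.2, hp, hpos]
      · rw [List.foldl_cons]; simp only [if_neg h1, if_neg h2]
        rw [ih]
        simp only [Prod.mk.injEq]
        constructor
        · by_cases hp : (p.length : Int) = cap
          · simp [pvTake, hp, pvTake_full]
          · have hpos : ¬ pvStars r ≥ 4 := fun h => h1 ⟨h, hp⟩
            simp [pvTake, hp, hpos]
        · by_cases hn : (n.length : Int) = cap
          · simp [pvTake, hn, pvTake_full]
          · have hneg : ¬ pvStars r ≤ 2 := fun h => h2 ⟨h, hn⟩
            simp [pvTake, hn, hneg]

-- ===== VERDICT (by name: the statement is the Claim_ definition above) =====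
theorem split_by_rating_spec : Claim_equal_split_by_rating := by
  intro data cap _ _
  unfold Spec_split_by_rating split_by_rating split_by_rating_alt
  exact pv_loop_eq cap data [] []
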